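-- pv_equiv track=rewrite | github.com/yangqi0/petitgpt | pretrain/eval_bench.py | indent_as_function_body
-- ===== SOURCE A (Python) =====
-- def indent_as_function_body(body: str) -> str:
--     s = (body or "").replace("\t", "    ").strip("\n")
--     if not s.strip():
--         return "    pass"
--
--     # 1) normalize indentation to multiples of 4 (floor), keep relative structure
--     raw = []
--     for ln in s.splitlines():
--         ln = ln.rstrip()
--         if not ln.strip():
--             raw.append("")
--             continue
--         lead = len(ln) - len(ln.lstrip(" "))
--         lead2 = (lead // 4) * 4
--         raw.append((" " * lead2) + ln.lstrip(" "))
--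
--     # 2) FIX unexpected-indent noise:
--     # if current indent > prev indent but previous code line is NOT a block opener (no ':'),
--     # then snap current indent back to prev indent.
--     fixed = []
--     prev_indent = 0
--     prev_ends_colon = False
--     for ln in raw:
--         if not ln.strip():
--             fixed.append("")
--             continue
--         cur_indent = len(ln) - len(ln.lstrip(" "))
--         txt = ln.lstrip(" ")
--
--         if (cur_indent > prev_indent) and (not prev_ends_colon):
--             cur_indent = prev_indent  # snap back
--
--         fixed_ln = (" " * cur_indent) + txt
--         fixed.append(fixed_ln)
--
--         prev_indent = cur_indent
--         prev_ends_colon = fixed_ln.rstrip().endswith(":")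
--
--     # 3) indent into function body
--     return "\n".join(("    " + ln) if ln.strip() else "" for ln in fixed)
-- ===== SOURCE B (Python) =====
-- def indent_as_function_body(body: str) -> str:
--     s = (body or "").replace("\t", "    ").strip("\n")
--     if not s.strip():
--         return "    pass"
--     out = []
--     prev_indent = 0
--     prev_colon = False
--     for ln in s.splitlines():
--         ln = ln.rstrip()
--         txt = ln.lstrip(" ")
--         if not txt:
--             out.append("")
--             continue
--         cur = (len(ln) - len(txt)) // 4 * 4
--         if cur > prev_indent and not prev_colon:
--             cur = prev_indent
--         out.append("    " + " " * cur + txt)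
--         prev_indent = cur
--         prev_colon = txt.endswith(":")
--     return "\n".join(out)
-- ===== Notes on version B (the rewrite author's own statement) =====
-- stated objective: simpler
-- what changed: Replaces the three list-building passes (normalize, snap-back, body-indent) by one fused pass over s.splitlines() that carries prev_indent/prev_ends_colon directly and emits each final line immediately; no intermediate lists.
import Mathlib
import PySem

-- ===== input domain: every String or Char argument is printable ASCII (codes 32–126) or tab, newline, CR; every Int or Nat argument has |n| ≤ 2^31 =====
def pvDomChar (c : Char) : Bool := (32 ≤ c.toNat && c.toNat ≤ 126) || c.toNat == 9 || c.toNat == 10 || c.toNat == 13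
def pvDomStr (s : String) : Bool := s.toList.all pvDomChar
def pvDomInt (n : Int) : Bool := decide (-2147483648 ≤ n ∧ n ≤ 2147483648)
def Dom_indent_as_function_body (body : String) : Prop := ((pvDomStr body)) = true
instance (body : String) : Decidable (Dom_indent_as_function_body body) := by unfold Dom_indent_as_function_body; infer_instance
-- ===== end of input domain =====

-- B fuses A's three list-building passes into one pass that carries prev_indent/prev_ends_colon and emits each final body line directly (objective: simpler).

-- ===== PORT A =====
-- pass 1 body for one line: rstrip, blank → "", else floor the leading spaces to a multiple of 4
-- (ln.lstrip(" ") is ported by hand as dropWhile (· == ' '): it drops exactly the leading ' ' characters;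
--  len(ln) - len(ln.lstrip(" ")) is a Nat subtraction of a shorter length, exact)
def pvNormLine (ln : List Char) : List Char :=
  let ln := PySem.Chars.rstrip ln
  if PySem.Chars.strip ln = [] then []
  else
    let lead := ln.length - (ln.dropWhile (fun c => c == ' ')).length
    let lead2 := lead / 4 * 4
    List.replicate lead2 ' ' ++ ln.dropWhile (fun c => c == ' ')

-- pass 2 body: state = (fixed, prev_indent, prev_ends_colon); Python's ints here are always ≥ 0, kept as Nat
def pvFixStep (st : List (List Char) × Nat × Bool) (ln : List Char) : List (List Char) × Nat × Bool :=
  if PySem.Chars.strip ln = [] then (st.1 ++ [[]], st.2.1, st.2.2)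
  else
    let cur0 := ln.length - (ln.dropWhile (fun c => c == ' ')).length
    let txt := ln.dropWhile (fun c => c == ' ')
    let cur := if decide (st.2.1 < cur0) && !st.2.2 then st.2.1 else cur0
    let fixedLn := List.replicate cur ' ' ++ txt
    (st.1 ++ [fixedLn], cur, PySem.Chars.endswith (PySem.Chars.rstrip fixedLn) [':'])

-- pass 3 body: ("    " + ln) if ln.strip() else ""
def pvPost (ln : List Char) : List Char :=
  if PySem.Chars.strip ln = [] then [] else [' ', ' ', ' ', ' '] ++ ln

def indent_as_function_body (body : String) : String :=
  let s := PySem.Chars.stripChars (PySem.Chars.replace body.toList ['\t'] [' ', ' ', ' ', ' ']) ['\n']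
  if PySem.Chars.strip s = [] then "    pass"
  else
    let raw := (PySem.Chars.splitlines s).foldl (fun acc ln => acc ++ [pvNormLine ln]) []
    let st := raw.foldl pvFixStep ([], 0, false)
    String.ofList (PySem.Chars.join ['\n'] (st.1.map pvPost))

-- ===== PORT B =====
-- one pass: rstrip, blank → "" (state untouched), else snap the floored indent and emit the body line
def pvAltStep (st : List (List Char) × Nat × Bool) (ln0 : List Char) : List (List Char) × Nat × Bool :=
  let ln := PySem.Chars.rstrip ln0
  let txt := ln.dropWhile (fun c => c == ' ')
  if txt = [] then (st.1 ++ [[]], st.2.1, st.2.2)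
  else
    let cur0 := (ln.length - txt.length) / 4 * 4
    let cur := if decide (st.2.1 < cur0) && !st.2.2 then st.2.1 else cur0
    (st.1 ++ [[' ', ' ', ' ', ' '] ++ List.replicate cur ' ' ++ txt], cur, PySem.Chars.endswith txt [':'])

def indent_as_function_body_alt (body : String) : String :=
  let s := PySem.Chars.stripChars (PySem.Chars.replace body.toList ['\t'] [' ', ' ', ' ', ' ']) ['\n']
  if PySem.Chars.strip s = [] then "    pass"
  else
    let st := (PySem.Chars.splitlines s).foldl pvAltStep ([], 0, false)
    String.ofList (PySem.Chars.join ['\n'] st.1)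

-- ===== PRECONDITION & SPEC =====
def Spec_indent_as_function_body (body : String) (out : String) : Prop := out = indent_as_function_body_alt body
instance (body : String) (out : String) : Decidable (Spec_indent_as_function_body body out) := by unfold Spec_indent_as_function_body; infer_instance

-- ===== CLAIM (what is proved, stated in full; the proofs are below) =====
def Claim_equal_indent_as_function_body : Prop := ∀ (body : String), Dom_indent_as_function_body body → Spec_indent_as_function_body body (indent_as_function_body body)

-- ===== LEMMAS AND PROOFS =====

-- the last character of rstrip l is never whitespace
lemma pv_rstrip_getLast? {l : List Char} {c : Char}
    (h : (PySem.Chars.rstrip l).getLast? = some c) : PySem.Chars.isspace c = false := by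
  unfold PySem.Chars.rstrip at h
  rw [List.getLast?_eq_head?_reverse, List.reverse_reverse] at h
  have := List.head?_dropWhile_not PySem.Chars.isspace l.reverse
  rw [h] at this
  simpa using this

-- strip l = [] iff l is all whitespace
lemma pv_strip_eq_nil_iff (l : List Char) :
    PySem.Chars.strip l = [] ↔ ∀ c ∈ l, PySem.Chars.isspace c = true := by
  unfold PySem.Chars.strip PySem.Chars.rstrip PySem.Chars.lstrip
  simp only [List.reverse_eq_nil_iff, List.dropWhile_eq_nil_iff, List.mem_reverse]
  constructor
  · intro h c hc
    rw [← List.takeWhile_append_dropWhile (p := PySem.Chars.isspace) (l := l)] at hc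
    rcases List.mem_append.mp hc with h1 | h2
    · exact List.mem_takeWhile_imp h1
    · exact h c h2
  · intro h c hc
    exact h c ((List.dropWhile_suffix _).subset hc)

lemma pv_singleton_suffix_iff {α : Type} (a : α) (l : List α) :
    [a] <:+ l ↔ l.getLast? = some a := by
  rw [← List.reverse_prefix, List.getLast?_eq_head?_reverse]
  cases l.reverse with
  | nil => simp
  | cons b t => simp [List.cons_prefix_cons, eq_comm]

-- rstrip is the identity on a list whose last character is not whitespace
lemma pv_rstrip_of_getLast? {x : List Char} {e : Char}
    (h : x.getLast? = some e) (hs : PySem.Chars.isspace e = false) :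
    PySem.Chars.rstrip x = x := by
  unfold PySem.Chars.rstrip
  rw [show x.reverse.dropWhile PySem.Chars.isspace = x.reverse from ?_, List.reverse_reverse]
  cases hfr : x.reverse with
  | nil => rfl
  | cons y ys =>
    have hy : y = e := by
      rw [List.getLast?_eq_head?_reverse, hfr] at h
      simpa using h
    rw [List.dropWhile_cons, hy, hs]
    simp

-- per-line agreement of B's fused step with (pass 1 line; pass 2 step), through pvPost
lemma pv_step (a : List (List Char)) (p : Nat) (c : Bool) (ln : List Char) :
    pvAltStep (a.map pvPost, p, c) ln =
      ((pvFixStep (a, p, c) (pvNormLine ln)).1.map pvPost,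
       (pvFixStep (a, p, c) (pvNormLine ln)).2.1,
       (pvFixStep (a, p, c) (pvNormLine ln)).2.2) := by
  by_cases ht : (PySem.Chars.rstrip ln).dropWhile (fun c => c == ' ') = []
  · -- blank line: the rstripped line is in fact empty
    have hmnil : PySem.Chars.rstrip ln = [] := by
      cases hg : (PySem.Chars.rstrip ln).getLast? with
      | none => exact List.getLast?_eq_none_iff.mp hg
      | some e =>
        have hsp := pv_rstrip_getLast? hg
        have hmem := List.mem_of_getLast? hg
        have he : (e == ' ') = true := by
          have := List.dropWhile_eq_nil_iff.mp ht
          simpa using this e hmem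
        simp at he
        subst he
        exact absurd hsp (by decide)
    simp only [pvAltStep, pvNormLine, pvFixStep, hmnil]
    simp [pvPost, PySem.Chars.strip, PySem.Chars.rstrip, PySem.Chars.lstrip]
  · -- code line
    have hmne : PySem.Chars.rstrip ln ≠ [] := by
      intro h; exact ht (by simp [h])
    obtain ⟨e, he⟩ : ∃ e, (PySem.Chars.rstrip ln).getLast? = some e := by
      cases hg : (PySem.Chars.rstrip ln).getLast? with
      | none => exact absurd (List.getLast?_eq_none_iff.mp hg) hmne
      | some e => exact ⟨e, rfl⟩
    have hesp : PySem.Chars.isspace e = false := pv_rstrip_getLast? he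
    have hte : ((PySem.Chars.rstrip ln).dropWhile (fun c => c == ' ')).getLast? = some e := by
      obtain ⟨u, hu⟩ := List.dropWhile_suffix (l := PySem.Chars.rstrip ln) (fun c => c == ' ')
      rw [← hu, List.getLast?_append_of_ne_nil u ht] at he
      exact he
    have hhead : ∀ h0, ((PySem.Chars.rstrip ln).dropWhile (fun c => c == ' ')).head? = some h0 → (h0 == ' ') = false := by
      intro h0 hh
      have := List.head?_dropWhile_not (fun c => c == ' ') (PySem.Chars.rstrip ln)
      rw [hh] at this
      simpa using this
    have hdroptxt : ((PySem.Chars.rstrip ln).dropWhile (fun c => c == ' ')).dropWhile (fun c => c == ' ') = (PySem.Chars.rstrip ln).dropWhile (fun c => c == ' ') := by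
      cases hc : (PySem.Chars.rstrip ln).dropWhile (fun c => c == ' ') with
      | nil => rfl
      | cons h0 tl =>
        rw [List.dropWhile_cons, hhead h0 (by rw [hc]; rfl)]
        simp
    have hdropn : ∀ k : Nat, (List.replicate k ' ' ++ (PySem.Chars.rstrip ln).dropWhile (fun c => c == ' ')).dropWhile (fun c => c == ' ') = (PySem.Chars.rstrip ln).dropWhile (fun c => c == ' ') := by
      intro k
      rw [List.dropWhile_append_of_pos (by intro x hx; simp [List.eq_of_mem_replicate hx]), hdroptxt]
    have hlastapp : ∀ k : Nat, (List.replicate k ' ' ++ (PySem.Chars.rstrip ln).dropWhile (fun c => c == ' ')).getLast? = some e := by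
      intro k
      rw [List.getLast?_append_of_ne_nil _ ht]
      exact hte
    have hstripapp : ∀ k : Nat, PySem.Chars.strip (List.replicate k ' ' ++ (PySem.Chars.rstrip ln).dropWhile (fun c => c == ' ')) ≠ [] := by
      intro k hnil
      have := (pv_strip_eq_nil_iff _).mp hnil e (List.mem_of_getLast? (hlastapp k))
      rw [hesp] at this
      exact absurd this (by decide)
    have hstripm : PySem.Chars.strip (PySem.Chars.rstrip ln) ≠ [] := by
      intro hnil
      have := (pv_strip_eq_nil_iff _).mp hnil e (List.mem_of_getLast? he)
      rw [hesp] at this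
      exact absurd this (by decide)
    have hrs : ∀ k : Nat, PySem.Chars.rstrip (List.replicate k ' ' ++ (PySem.Chars.rstrip ln).dropWhile (fun c => c == ' ')) = List.replicate k ' ' ++ (PySem.Chars.rstrip ln).dropWhile (fun c => c == ' ') := fun k =>
      pv_rstrip_of_getLast? (hlastapp k) hesp
    have hend : ∀ k : Nat, PySem.Chars.endswith (List.replicate k ' ' ++ (PySem.Chars.rstrip ln).dropWhile (fun c => c == ' ')) [':'] = PySem.Chars.endswith ((PySem.Chars.rstrip ln).dropWhile (fun c => c == ' ')) [':'] := by
      intro k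
      have hb : ∀ u v : Bool, (u = true ↔ v = true) → u = v := by decide
      apply hb
      rw [PySem.Chars.endswith_iff, PySem.Chars.endswith_iff, pv_singleton_suffix_iff, pv_singleton_suffix_iff, hlastapp k, hte]
    simp only [pvAltStep, pvNormLine, pvFixStep, pvPost, ht, hstripm, hdropn, hstripapp,
      hrs, hend, if_false, List.length_append, List.length_replicate, Nat.add_sub_cancel,
      List.map_append, List.map_cons, List.map_nil]
    rfl

lemma pv_fold (L : List (List Char)) (a : List (List Char)) (p : Nat) (c : Bool) :
    L.foldl pvAltStep (a.map pvPost, p, c) =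
      ((L.foldl (fun st ln => pvFixStep st (pvNormLine ln)) (a, p, c)).1.map pvPost,
       (L.foldl (fun st ln => pvFixStep st (pvNormLine ln)) (a, p, c)).2.1,
       (L.foldl (fun st ln => pvFixStep st (pvNormLine ln)) (a, p, c)).2.2) := by
  induction L generalizing a p c with
  | nil => rfl
  | cons ln t ih =>
    simp only [List.foldl_cons, pv_step]
    rw [ih]

-- ===== VERDICT (by name: the statement is the Claim_ definition above) =====
theorem indent_as_function_body_spec : Claim_equal_indent_as_function_body := by
  intro body _
  unfold Spec_indent_as_function_body indent_as_function_body indent_as_function_body_alt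
  simp only []
  split
  · rfl
  · rw [PySem.List.foldl_append_singleton_eq_map, List.nil_append, List.foldl_map]
    have h := pv_fold (PySem.Chars.splitlines
        (PySem.Chars.stripChars (PySem.Chars.replace body.toList ['\t'] [' ', ' ', ' ', ' ']) ['\n']))
        [] 0 false
    simp only [List.map_nil] at h
    rw [h]
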